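-- pv_equiv track=rewrite | github.com/posl/comment_recommendation | script/split_gen/2_time/ja/234_C/5.py | solve
-- ===== SOURCE A (Python) =====
-- def solve(N):
--     # 1桁目
--     ans = 0
--     n = 1
--     while True:
--         if N <= n:
--             ans += N
--             break
--         ans += n
--         N -= n
--         n *= 2
--     # 2桁目以降
--     n = 1
--     while True:
--         if N <= n:
--             ans += N * 10
--             break
--         ans += n * 10
--         N -= n
--         n *= 2
--     return ans
-- ===== SOURCE B (Python) =====
-- def solve(N):
--     # closed form: the first loop contributes N and leaves N - (2**m - 1),
--     # the second loop contributes 10x that remainder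
--     if N <= 1:
--         return 11 * N
--     m = N.bit_length() - 1
--     rem = N - ((1 << m) - 1)
--     return N + 10 * rem
-- ===== Notes on version B (the rewrite author's own statement) =====
-- stated objective: simpler
-- what changed: Replaced A's two doubling while-loops by the closed form N + 10*(N - (2^m - 1)) with m = bit_length(N)-1 (and 11*N for N <= 1), so B is pure arithmetic with no loops.
import Mathlib
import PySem

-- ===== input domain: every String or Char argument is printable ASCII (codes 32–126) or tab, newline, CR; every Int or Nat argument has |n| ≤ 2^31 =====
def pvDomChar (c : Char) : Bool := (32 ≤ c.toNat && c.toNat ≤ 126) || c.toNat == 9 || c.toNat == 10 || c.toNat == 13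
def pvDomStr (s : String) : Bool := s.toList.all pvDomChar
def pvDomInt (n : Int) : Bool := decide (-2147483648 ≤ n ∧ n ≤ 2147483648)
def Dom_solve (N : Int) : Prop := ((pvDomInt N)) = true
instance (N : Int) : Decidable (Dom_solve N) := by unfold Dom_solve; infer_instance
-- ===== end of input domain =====

-- B replaces A's two doubling loops by the closed form N + 10*(N - (2^m - 1)); objective: simpler.

-- ===== PORT A =====
-- first while loop: carries (N, n, ans); 0 < n is an invariant of the loop (n starts at 1 and doubles)
def solveLoop1 (N n ans : Int) (hn : 0 < n) : Int × Int :=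
  if N ≤ n then (ans + N, N)
  else solveLoop1 (N - n) (n * 2) (ans + n) (by omega)
termination_by N.toNat
decreasing_by simp only [not_le] at *; omega

-- second while loop
def solveLoop2 (N n ans : Int) (hn : 0 < n) : Int :=
  if N ≤ n then ans + N * 10
  else solveLoop2 (N - n) (n * 2) (ans + n * 10) (by omega)
termination_by N.toNat
decreasing_by simp only [not_le] at *; omega

def solve (N : Int) : Int :=
  let p := solveLoop1 N 1 0 (by omega)   -- (ans after first loop, remaining N)
  solveLoop2 p.2 1 p.1 (by omega)

-- ===== PORT B =====
-- N.bit_length() - 1 is ported by hand as Nat.log2 N.toNat (exact for N ≥ 2)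
def solve_alt (N : Int) : Int :=
  if N ≤ 1 then 11 * N
  else
    let m := Nat.log2 N.toNat
    let rem := N - ((2 : Int) ^ m - 1)
    N + 10 * rem

-- ===== PRECONDITION & SPEC =====
def Spec_solve (N : Int) (out : Int) : Prop := out = solve_alt N
instance (N : Int) (out : Int) : Decidable (Spec_solve N out) := by unfold Spec_solve; infer_instance

-- ===== CLAIM (what is proved, stated in full; the proofs are below) =====
def Claim_equal_solve : Prop := ∀ (N : Int), Dom_solve N → Spec_solve N (solve N)

-- ===== LEMMAS AND PROOFS =====

-- the loop's value does not depend on the positivity proof (needed to rewrite the n argument)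
lemma solveLoop1_congr (N n n' ans : Int) (h : 0 < n) (h' : 0 < n') (e : n = n') :
    solveLoop1 N n ans h = solveLoop1 N n' ans h' := by subst e; rfl

-- states reachable from (N₀, 1) are (N₀ - (2^i - 1), 2^i); the loop stops at i = m with 2^m ≤ N₀ < 2^(m+1)
lemma loop1_eval (m : Nat) : ∀ (i : Nat) (N₀ ans : Int), i ≤ m →
    (2 : Int) ^ m ≤ N₀ → N₀ < 2 ^ (m + 1) →
    solveLoop1 (N₀ - (2 ^ i - 1)) (2 ^ i) ans (by positivity) =
      (ans + (N₀ - (2 ^ i - 1)), N₀ - (2 ^ m - 1)) := by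
  intro i
  induction h : m - i generalizing i with
  | zero =>
    intro N₀ ans him h1 h2
    have hi : i = m := by omega
    subst hi
    rw [solveLoop1]
    have : N₀ - (2 ^ i - 1) ≤ 2 ^ i := by
      have : (2:Int) ^ (i+1) = 2 ^ i * 2 := by ring
      omega
    simp [this]
  | succ k ih =>
    intro N₀ ans him h1 h2
    rw [solveLoop1]
    by_cases hc : N₀ - (2 ^ i - 1) ≤ 2 ^ i
    · -- stops now: then N₀ < 2^(i+1), so m ≤ i, contradiction with i < m unless i = m
      have him' : (2:Int) ^ m ≤ 2 ^ (i+1) - 1 := by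
        have : (2:Int) ^ (i+1) = 2 ^ i * 2 := by ring
        omega
      have : (2:Int) ^ (i+1) ≤ 2 ^ m := by
        apply pow_le_pow_right₀ (by norm_num)
        omega
      omega
    · simp only [hc, if_false]
      have heq : N₀ - (2 ^ i - 1) - 2 ^ i = N₀ - (2 ^ (i+1) - 1) := by
        have : (2:Int) ^ (i+1) = 2 ^ i * 2 := by ring
        omega
      have heq2 : (2:Int) ^ i * 2 = 2 ^ (i+1) := by ring
      have hile : i + 1 ≤ m := by
        by_contra hcon
        have hi : i = m := by omega
        subst hi
        have : (2:Int) ^ (i+1) = 2 ^ i * 2 := by ring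
        omega
      have := ih (i+1) (by omega) N₀ (ans + 2 ^ i) hile h1 h2
      rw [heq, solveLoop1_congr _ _ _ _ _ (by positivity) heq2, this]
      refine Prod.ext ?_ rfl
      show ans + 2 ^ i + (N₀ - (2 ^ (i + 1) - 1)) = ans + (N₀ - (2 ^ i - 1))
      have : (2:Int) ^ (i+1) = 2 ^ i * 2 := by ring
      omega

lemma loop2_eval : ∀ (N n ans : Int) (hn : 0 < n), solveLoop2 N n ans hn = ans + N * 10 := by
  intro N n ans hn
  rw [solveLoop2]
  split
  · rfl
  · rename_i hc
    have := loop2_eval (N - n) (n * 2) (ans + n * 10) (by omega)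
    rw [this]; ring
termination_by N n ans hn => N.toNat
decreasing_by simp only [not_le] at *; omega

lemma log2_bounds (N : Int) (h : 1 < N) :
    (2 : Int) ^ Nat.log2 N.toNat ≤ N ∧ N < 2 ^ (Nat.log2 N.toNat + 1) := by
  have h0 : N.toNat ≠ 0 := by omega
  have h1 := Nat.log2_self_le h0
  have h2 := Nat.lt_log2_self (n := N.toNat)
  constructor
  · calc ((2:Int) ^ Nat.log2 N.toNat) = ((2 ^ Nat.log2 N.toNat : Nat) : Int) := by push_cast; ring
      _ ≤ (N.toNat : Int) := by exact_mod_cast h1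
      _ = N := by omega
  · calc N = (N.toNat : Int) := by omega
      _ < ((2 ^ (Nat.log2 N.toNat + 1) : Nat) : Int) := by exact_mod_cast h2
      _ = (2:Int) ^ (Nat.log2 N.toNat + 1) := by push_cast; ring

-- ===== VERDICT (by name: the statement is the Claim_ definition above) =====
theorem solve_spec : Claim_equal_solve := by
  intro N _
  unfold Spec_solve solve solve_alt
  by_cases h : N ≤ 1
  · -- both loops break immediately
    rw [solveLoop1]
    simp only [h, if_true]
    rw [loop2_eval]
    ring
  · rw [not_le] at h
    obtain ⟨hl, hu⟩ := log2_bounds N h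
    have := loop1_eval (Nat.log2 N.toNat) 0 N 0 (Nat.zero_le _) hl hu
    simp only [pow_zero] at this
    have e1 : N - ((1:Int) - 1) = N := by ring
    rw [e1] at this
    simp only [this, loop2_eval]
    simp only [not_le.mpr h, if_false]
    ring
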